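-- pv_equiv track=rewrite | github.com/hwkim3330/lidar-tas260226 | scripts/generate_packet_layout_detailed.py | ip_fragment_payloads
-- ===== SOURCE A (Python) =====
-- def ip_fragment_payloads(udp_payload: int, mtu: int = 1500) -> list[int]:
--     # IP payload includes UDP header(8) on first fragment stream.
--     udp_len = udp_payload + 8
--     max_ip_payload = mtu - 20
--     out = []
--     rem = udp_len
--     while rem > 0:
--         x = min(max_ip_payload, rem)
--         out.append(x)
--         rem -= x
--     return out
-- ===== SOURCE B (Python) =====
-- def ip_fragment_payloads(udp_payload: int, mtu: int = 1500) -> list[int]: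
--     udp_len = udp_payload + 8
--     if udp_len <= 0:
--         return []
--     max_ip_payload = mtu - 20
--     q, r = divmod(udp_len, max_ip_payload)
--     return [max_ip_payload] * q + ([r] if r else [])
-- ===== Notes on version B (the rewrite author's own statement) =====
-- stated objective: simpler
-- what changed: Replaces the per-fragment while-loop accumulation with a closed-form divmod: q full fragments of mtu-20 plus an optional remainder fragment.
import Mathlib
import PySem

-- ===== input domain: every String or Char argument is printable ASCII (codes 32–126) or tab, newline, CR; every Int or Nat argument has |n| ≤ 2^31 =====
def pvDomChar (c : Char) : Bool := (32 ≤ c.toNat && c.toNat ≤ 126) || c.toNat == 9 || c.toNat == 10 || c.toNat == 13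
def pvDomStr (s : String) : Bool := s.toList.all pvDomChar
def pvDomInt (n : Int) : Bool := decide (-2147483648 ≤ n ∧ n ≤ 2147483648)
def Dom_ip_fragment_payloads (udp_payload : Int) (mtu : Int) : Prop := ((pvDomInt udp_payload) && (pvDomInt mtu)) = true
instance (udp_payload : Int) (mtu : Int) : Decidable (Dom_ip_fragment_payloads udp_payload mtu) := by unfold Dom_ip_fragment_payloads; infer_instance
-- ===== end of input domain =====

-- B: closed-form divmod instead of A's per-fragment while-loop (simpler; same cost)
-- (q full fragments of mtu-20 plus an optional remainder fragment).

-- ===== PORT A =====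
-- The while-loop of A, with fuel bounding the number of iterations (each iteration
-- subtracts at least 1 from rem whenever the loop can terminate, i.e. inside Pre_).
def ipFragLoopA (maxIpPayload : Int) : Nat → Int → List Int → List Int
  | 0, _, out => out
  | fuel + 1, rem, out =>
    if 0 < rem then
      ipFragLoopA maxIpPayload fuel (rem - min maxIpPayload rem) (out ++ [min maxIpPayload rem])
    else out

def ip_fragment_payloads (udp_payload : Int) (mtu : Int) : List Int :=
  let udp_len := udp_payload + 8
  let max_ip_payload := mtu - 20
  ipFragLoopA max_ip_payload udp_len.toNat udp_len []

-- ===== PORT B =====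
def ip_fragment_payloads_alt (udp_payload : Int) (mtu : Int) : List Int :=
  let udp_len := udp_payload + 8
  if udp_len ≤ 0 then []
  else
    let max_ip_payload := mtu - 20
    let q := PySem.Int.floordiv udp_len max_ip_payload
    let r := PySem.Int.mod udp_len max_ip_payload
    List.replicate q.toNat max_ip_payload ++ (if r ≠ 0 then [r] else [])

-- ===== PRECONDITION & SPEC =====
-- A's while loop diverges when udp_payload + 8 > 0 and mtu - 20 ≤ 0 (rem never decreases);
-- Pre_ excludes exactly those diverging inputs.
def Pre_ip_fragment_payloads (udp_payload : Int) (mtu : Int) : Prop :=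
  udp_payload + 8 ≤ 0 ∨ 21 ≤ mtu
instance (udp_payload : Int) (mtu : Int) : Decidable (Pre_ip_fragment_payloads udp_payload mtu) := by
  unfold Pre_ip_fragment_payloads; infer_instance

def pvWitness_ip_fragment_payloads : Int × Int := (1400, 1500)

def Spec_ip_fragment_payloads (udp_payload : Int) (mtu : Int) (out : List Int) : Prop := out = ip_fragment_payloads_alt udp_payload mtu
instance (udp_payload : Int) (mtu : Int) (out : List Int) : Decidable (Spec_ip_fragment_payloads udp_payload mtu out) := by unfold Spec_ip_fragment_payloads; infer_instance

-- ===== CLAIM (what is proved, stated in full; the proofs are below) =====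
def Claim_equal_ip_fragment_payloads : Prop := ∀ (udp_payload : Int) (mtu : Int), Dom_ip_fragment_payloads udp_payload mtu → Pre_ip_fragment_payloads udp_payload mtu → Spec_ip_fragment_payloads udp_payload mtu (ip_fragment_payloads udp_payload mtu)

-- ===== LEMMAS AND PROOFS =====

-- Closed form of what the loop appends for a nonnegative remaining length.
def fragSpec (m rem : Int) : List Int :=
  List.replicate (PySem.Int.floordiv rem m).toNat m ++
    (if PySem.Int.mod rem m ≠ 0 then [PySem.Int.mod rem m] else [])

lemma fragSpec_zero (m : Int) (hm : 0 < m) : fragSpec m 0 = [] := by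
  simp [fragSpec, PySem.Int.floordiv_eq_ediv_of_pos hm, PySem.Int.mod_eq_emod_of_pos hm]

lemma fragSpec_small (m rem : Int) (hm : 0 < m) (h0 : 0 < rem) (h : rem ≤ m) :
    fragSpec m rem = [rem] := by
  rcases eq_or_lt_of_le h with h | h
  · subst h
    simp [fragSpec, PySem.Int.floordiv_eq_ediv_of_pos hm, PySem.Int.mod_eq_emod_of_pos hm,
      Int.ediv_self (by omega : rem ≠ 0)]
  · have hd : PySem.Int.floordiv rem m = 0 := by
      rw [PySem.Int.floordiv_eq_iff_of_pos hm]; omega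
    have hmod : PySem.Int.mod rem m = rem := by
      have := PySem.Int.floordiv_mul_add_mod rem m
      rw [hd] at this; omega
    have hne : rem ≠ 0 := by omega
    simp [fragSpec, hd, hmod, hne]

lemma fragSpec_step (m rem : Int) (hm : 0 < m) (h : m < rem) :
    fragSpec m rem = m :: fragSpec m (rem - m) := by
  have hd : PySem.Int.floordiv rem m = PySem.Int.floordiv (rem - m) m + 1 := by
    rw [PySem.Int.floordiv_eq_iff_of_pos hm]
    have h1 := PySem.Int.floordiv_mul_add_mod (rem - m) m
    have h2 := PySem.Int.mod_nonneg (rem - m) hm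
    have h3 := PySem.Int.mod_lt (rem - m) hm
    constructor <;> nlinarith
  have hmod : PySem.Int.mod rem m = PySem.Int.mod (rem - m) m := by
    have h1 := PySem.Int.floordiv_mul_add_mod (rem - m) m
    have h2 := PySem.Int.floordiv_mul_add_mod rem m
    rw [hd] at h2; nlinarith
  have hq : 0 ≤ PySem.Int.floordiv (rem - m) m := by
    have h1 := PySem.Int.floordiv_mul_add_mod (rem - m) m
    have h3 := PySem.Int.mod_lt (rem - m) hm
    nlinarith
  have : (PySem.Int.floordiv rem m).toNat = (PySem.Int.floordiv (rem - m) m).toNat + 1 := by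
    omega
  simp [fragSpec, this, hmod, List.replicate_succ]

-- The loop with enough fuel computes out ++ fragSpec m rem.
lemma loopA_eq_fragSpec (m : Int) (hm : 0 < m) :
    ∀ (fuel : Nat) (rem : Int) (out : List Int), 0 ≤ rem → rem ≤ (fuel : Int) →
      ipFragLoopA m fuel rem out = out ++ fragSpec m rem := by
  intro fuel
  induction fuel with
  | zero =>
    intro rem out h0 hf
    have : rem = 0 := by omega
    subst this
    simp [ipFragLoopA, fragSpec_zero m hm]
  | succ f ih =>
    intro rem out h0 hf
    by_cases hpos : 0 < rem
    · rw [ipFragLoopA, if_pos hpos]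
      by_cases hle : rem ≤ m
      · have hmin : min m rem = rem := by omega
        rw [hmin, sub_self]
        rw [ih 0 (out ++ [rem]) le_rfl (by positivity)]
        rw [fragSpec_zero m hm, fragSpec_small m rem hm hpos hle]
        simp
      · have hmin : min m rem = m := by omega
        rw [hmin]
        rw [ih (rem - m) (out ++ [m]) (by omega) (by omega)]
        rw [fragSpec_step m rem hm (by omega)]
        simp
    · rw [ipFragLoopA, if_neg hpos]
      have : rem = 0 := by omega
      subst this
      simp [fragSpec_zero m hm]

-- ===== VERDICT (by name: the statement is the Claim_ definition above) =====
theorem ip_fragment_payloads_spec : Claim_equal_ip_fragment_payloads := by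
  intro u mtu _ hpre
  unfold Spec_ip_fragment_payloads ip_fragment_payloads ip_fragment_payloads_alt
  set L := u + 8 with hL
  by_cases hneg : L ≤ 0
  · have : L.toNat = 0 := by omega
    simp [this, ipFragLoopA, hneg]
  · have hLpos : 0 < L := by omega
    have hm : 0 < mtu - 20 := by
      rcases hpre with h | h
      · omega
      · omega
    rw [if_neg hneg]
    simp only []
    rw [loopA_eq_fragSpec (mtu - 20) hm L.toNat L [] (by omega) (by omega)]
    simp [fragSpec]
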